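-- pv_equiv track=rewrite | github.com/lihongqing2001-gif/MyOpenclaw | scripts/knowledge_digest.py | parse_comm_log
-- ===== SOURCE A (Python) =====
-- def parse_comm_log(text: str):
--     blocks = []
--     current = None
--     for line in text.splitlines():
--         if line.startswith('## '):
--             if current:
--                 blocks.append(current)
--             current = {'request_id': line.replace('## ', '').strip()}
--         elif current and line.startswith('- ') and ':' in line:
--             k, v = line[2:].split(':', 1)
--             current[k.strip()] = v.strip()
--     if current:
--         blocks.append(current)
--     return blocks
-- ===== SOURCE B (Python) =====
-- def parse_comm_log(text: str):
--     # Two passes: first group lines under their '## ' headers, then build each dict.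
--     groups = []  # list of (header line, [lines following it])
--     for line in text.splitlines():
--         if line.startswith('## '):
--             groups.append((line, []))
--         elif groups:
--             groups[-1][1].append(line)
--     result = []
--     for header, body in groups:
--         d = {'request_id': header.replace('## ', '').strip()}
--         for line in body:
--             if line.startswith('- ') and ':' in line:
--                 k, v = line[2:].split(':', 1)
--                 d[k.strip()] = v.strip()
--         result.append(d)
--     return result
-- ===== Notes on version B (the rewrite author's own statement) =====
-- stated objective: alternative
-- what changed: A interleaves grouping and dict-building in one loop with an Optional current dict; B first partitions the splitlines into (header, body-lines) groups, then maps each group to its dict in a second pass.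
import Mathlib
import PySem

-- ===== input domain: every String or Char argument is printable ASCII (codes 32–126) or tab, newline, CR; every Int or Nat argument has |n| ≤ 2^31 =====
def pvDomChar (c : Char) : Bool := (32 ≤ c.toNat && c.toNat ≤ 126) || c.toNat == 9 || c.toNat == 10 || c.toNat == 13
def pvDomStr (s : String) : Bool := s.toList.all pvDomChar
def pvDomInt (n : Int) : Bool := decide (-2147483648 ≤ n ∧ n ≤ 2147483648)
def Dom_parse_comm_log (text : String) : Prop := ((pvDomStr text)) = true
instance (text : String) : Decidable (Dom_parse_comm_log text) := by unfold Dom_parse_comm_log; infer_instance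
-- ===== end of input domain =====

-- B replaces A's single interleaved loop (Optional current dict) by a two-pass decomposition:
-- group lines under their headers first, then build each block's dict; same values, same cost.

-- shared little expressions both Pythons contain verbatim:
-- {'request_id': line.replace('## ', '').strip()}
def pvSeed (line : String) : PySem.Dict String String :=
  PySem.Dict.ofList [("request_id", PySem.Str.strip (PySem.Str.replace line "## " ""))]
-- k, v = line[2:].split(':', 1)
def pvLineKV (line : String) : Option (String × String) :=
  match PySem.Str.splitMax? (PySem.Str.slice line (some 2) none) ":" 1 with
  | some (k :: v :: _) => some (k, v)
  | _ => none

-- ===== PORT A =====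
-- 'if current: blocks.append(current)' (a dict is truthy iff nonempty)
def pvAFinish (st : List (PySem.Dict String String) × Option (PySem.Dict String String)) :
    List (PySem.Dict String String) :=
  match st.2 with
  | some d => if d.size != 0 then st.1 ++ [d] else st.1
  | none => st.1

def pvAStep (st : List (PySem.Dict String String) × Option (PySem.Dict String String))
    (line : String) : List (PySem.Dict String String) × Option (PySem.Dict String String) :=
  if PySem.Str.startswith line "## " then
    (pvAFinish st, some (pvSeed line))
  else
    match st.2 with
    | some d =>
      if (d.size != 0) && PySem.Str.startswith line "- " && PySem.Str.isIn ":" line then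
        (st.1, some (match pvLineKV line with
                     | some (k, v) => d.insert (PySem.Str.strip k) (PySem.Str.strip v)
                     | none => d))
      else (st.1, some d)
    | none => st

def parse_comm_log (text : String) : List (List (String × String)) :=
  (pvAFinish ((PySem.Str.splitlines text).foldl pvAStep ([], none))).map (·.items)

-- ===== PORT B =====
-- first pass: open a new (header, []) group on '## ', else append the line to the last group's body
def pvGStep (gs : List (String × List String)) (line : String) : List (String × List String) :=
  if PySem.Str.startswith line "## " then gs ++ [(line, [])]
  else
    match gs.getLast? with
    | some (h, b) => gs.dropLast ++ [(h, b ++ [line])]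
    | none => gs

-- second pass, per group: seed the dict from the header, then fold the body lines into it
def pvFillStep (d : PySem.Dict String String) (line : String) : PySem.Dict String String :=
  if PySem.Str.startswith line "- " && PySem.Str.isIn ":" line then
    match pvLineKV line with
    | some (k, v) => d.insert (PySem.Str.strip k) (PySem.Str.strip v)
    | none => d
  else d

def pvBlock (g : String × List String) : PySem.Dict String String :=
  g.2.foldl pvFillStep (pvSeed g.1)

def parse_comm_log_alt (text : String) : List (List (String × String)) :=
  (((PySem.Str.splitlines text).foldl pvGStep []).map pvBlock).map (·.items)

-- ===== PRECONDITION & SPEC =====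
def Spec_parse_comm_log (text : String) (out : List (List (String × String))) : Prop := out = parse_comm_log_alt text
instance (text : String) (out : List (List (String × String))) : Decidable (Spec_parse_comm_log text out) := by unfold Spec_parse_comm_log; infer_instance

-- ===== CLAIM (what is proved, stated in full; the proofs are below) =====
def Claim_equal_parse_comm_log : Prop := ∀ (text : String), Dom_parse_comm_log text → Spec_parse_comm_log text (parse_comm_log text)

-- ===== LEMMAS AND PROOFS =====

lemma pvFillStep_size (d : PySem.Dict String String) (l : String) (h : d.size ≠ 0) :
    (pvFillStep d l).size ≠ 0 := by
  unfold pvFillStep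
  split_ifs with h1
  · cases hkv : pvLineKV l with
    | none => simpa using h
    | some kv =>
      obtain ⟨k, v⟩ := kv
      show (d.insert (PySem.Str.strip k) (PySem.Str.strip v)).size ≠ 0
      rw [PySem.Dict.size_insert]
      split_ifs <;> omega
  · exact h

lemma pvFill_size (body : List String) (d : PySem.Dict String String) (h : d.size ≠ 0) :
    (body.foldl pvFillStep d).size ≠ 0 := by
  induction body generalizing d with
  | nil => exact h
  | cons l ls ih => exact ih _ (pvFillStep_size d l h)

lemma pvSeed_size (line : String) : (pvSeed line).size ≠ 0 := by
  unfold pvSeed PySem.Dict.ofList PySem.Dict.update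
  simp only [List.foldl_cons, List.foldl_nil]
  rw [PySem.Dict.size_insert]
  simp [PySem.Dict.contains_empty, PySem.Dict.size_empty]

lemma pvBlock_size (g : String × List String) : (pvBlock g).size ≠ 0 :=
  pvFill_size _ _ (pvSeed_size g.1)

lemma pvAFinish_some (bs : List (PySem.Dict String String)) (d : PySem.Dict String String)
    (hd : d.size ≠ 0) : pvAFinish (bs, some d) = bs ++ [d] := by
  have h : (d.size != 0) = true := by simpa using hd
  unfold pvAFinish
  simp only [h, if_true]

lemma pvAStep_header (st : List (PySem.Dict String String) × Option (PySem.Dict String String))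
    (l : String) (hl : PySem.Str.startswith l "## " = true) :
    pvAStep st l = (pvAFinish st, some (pvSeed l)) := by
  unfold pvAStep; rw [if_pos hl]

lemma pvAStep_some (bs : List (PySem.Dict String String)) (d : PySem.Dict String String)
    (l : String) (hd : d.size ≠ 0) (hl : ¬ PySem.Str.startswith l "## " = true) :
    pvAStep (bs, some d) l = (bs, some (pvFillStep d l)) := by
  have h : (d.size != 0) = true := by simpa using hd
  unfold pvAStep pvFillStep
  rw [if_neg hl]
  simp only [h, Bool.true_and]
  split_ifs <;> rfl

lemma pvAStep_none (bs : List (PySem.Dict String String)) (l : String)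
    (hl : ¬ PySem.Str.startswith l "## " = true) :
    pvAStep (bs, none) l = (bs, none) := by
  unfold pvAStep; rw [if_neg hl]

lemma pvGStep_header (gs : List (String × List String)) (l : String)
    (hl : PySem.Str.startswith l "## " = true) : pvGStep gs l = gs ++ [(l, [])] := by
  unfold pvGStep; rw [if_pos hl]

lemma pvGStep_body (gs : List (String × List String)) (h : String) (b : List String) (l : String)
    (hl : ¬ PySem.Str.startswith l "## " = true) :
    pvGStep (gs ++ [(h, b)]) l = gs ++ [(h, b ++ [l])] := by
  unfold pvGStep
  rw [if_neg hl]
  simp only [List.getLast?_concat, List.dropLast_concat]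

lemma pvGStep_nil (l : String) (hl : ¬ PySem.Str.startswith l "## " = true) :
    pvGStep [] l = [] := by
  unfold pvGStep; rw [if_neg hl]; rfl

lemma pvBlock_concat (h : String) (body : List String) (l : String) :
    pvBlock (h, body ++ [l]) = pvFillStep (pvBlock (h, body)) l := by
  unfold pvBlock
  simp only [List.foldl_append, List.foldl_cons, List.foldl_nil]

lemma pvMain_some (lines : List String) (gs : List (String × List String)) (h : String)
    (body : List String) :
    pvAFinish (lines.foldl pvAStep (gs.map pvBlock, some (pvBlock (h, body)))) =
      (lines.foldl pvGStep (gs ++ [(h, body)])).map pvBlock := by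
  induction lines generalizing gs h body with
  | nil =>
    rw [List.foldl_nil, List.foldl_nil, pvAFinish_some _ _ (pvBlock_size (h, body))]
    simp only [List.map_append, List.map_cons, List.map_nil]
  | cons l ls ih =>
    by_cases hl : PySem.Str.startswith l "## " = true
    · rw [List.foldl_cons, List.foldl_cons, pvAStep_header _ _ hl,
        pvAFinish_some _ _ (pvBlock_size (h, body)), pvGStep_header _ _ hl]
      have e1 : gs.map pvBlock ++ [pvBlock (h, body)] = (gs ++ [(h, body)]).map pvBlock := by
        simp only [List.map_append, List.map_cons, List.map_nil]
      have e2 : pvSeed l = pvBlock (l, []) := rfl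
      rw [e1, e2]
      exact ih (gs ++ [(h, body)]) l []
    · rw [List.foldl_cons, List.foldl_cons,
        pvAStep_some _ _ _ (pvBlock_size (h, body)) hl, pvGStep_body _ _ _ _ hl,
        ← pvBlock_concat]
      exact ih gs h (body ++ [l])

lemma pvMain_none (lines : List String) :
    pvAFinish (lines.foldl pvAStep ([], none)) = (lines.foldl pvGStep []).map pvBlock := by
  induction lines with
  | nil => rfl
  | cons l ls ih =>
    by_cases hl : PySem.Str.startswith l "## " = true
    · rw [List.foldl_cons, List.foldl_cons, pvAStep_header _ _ hl, pvGStep_header _ _ hl]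
      have e2 : pvSeed l = pvBlock (l, []) := rfl
      have e1 : pvAFinish (([] : List (PySem.Dict String String)), none) =
          ([] : List (String × List String)).map pvBlock := rfl
      rw [e1, e2]
      exact pvMain_some ls [] l []
    · rw [List.foldl_cons, List.foldl_cons, pvAStep_none _ _ hl, pvGStep_nil _ hl]
      exact ih

-- ===== VERDICT (by name: the statement is the Claim_ definition above) =====
theorem parse_comm_log_spec : Claim_equal_parse_comm_log := by
  intro text _
  unfold Spec_parse_comm_log parse_comm_log parse_comm_log_alt
  rw [pvMain_none]
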